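-- pv_equiv track=rewrite | github.com/Lee12369/BJproblem | 2023-02-13/05-4659.PY | check_same_letter
-- ===== SOURCE A (Python) =====
-- def check_same_letter(word):
--     check = True
--     length = len(word)
--     for i in range(length - 1):
--         if word[i] == word[i + 1]:
--             if word[i] != 'e' and word[i] != 'o':
--                 check = False
--
--     return check
-- ===== SOURCE B (Python) =====
-- def _runs(s):
--     # run-length encoding of s: list of (char, run length)
--     runs = []
--     i, L = 0, len(s)
--     while i < L:
--         j = i + 1
--         while j < L and s[j] == s[i]:
--             j += 1
--         runs.append((s[i], j - i))
--         i = j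
--     return runs
--
--
-- def check_same_letter(word):
--     return all(ch in 'eo' or n == 1 for ch, n in _runs(word))
-- ===== Notes on version B (the rewrite author's own statement) =====
-- stated objective: alternative
-- what changed: Instead of scanning adjacent index pairs with a mutable flag, B first compresses the word into a run-length encoding (char, run length) and then checks that every run longer than one character is a run of an exempt letter.
import Mathlib
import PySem

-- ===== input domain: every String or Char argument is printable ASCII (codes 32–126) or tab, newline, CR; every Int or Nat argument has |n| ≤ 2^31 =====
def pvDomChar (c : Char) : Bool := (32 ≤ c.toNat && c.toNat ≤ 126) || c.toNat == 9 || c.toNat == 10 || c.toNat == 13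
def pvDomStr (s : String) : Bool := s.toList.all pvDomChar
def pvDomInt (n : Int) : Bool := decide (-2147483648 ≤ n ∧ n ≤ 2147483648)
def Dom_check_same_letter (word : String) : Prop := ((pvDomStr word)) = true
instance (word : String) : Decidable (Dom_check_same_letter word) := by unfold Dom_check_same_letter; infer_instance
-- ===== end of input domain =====

-- B replaces A's adjacent-pair scan with a flag by a run-length encoding of the word followed
-- by a check that every run of length > 1 is an 'e' or 'o' run (alternative decomposition).

-- ===== PORT A =====
-- loop body of A: word[i] == word[i+1] and word[i] not in {'e','o'} clears the flag
def pvABody (cs : List Char) (check : Bool) (i : Nat) : Bool :=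
  if cs.getD i ' ' = cs.getD (i + 1) ' ' then
    if cs.getD i ' ' ≠ 'e' ∧ cs.getD i ' ' ≠ 'o' then false else check
  else check

def check_same_letter (word : String) : Bool :=
  let cs := word.toList
  let length := cs.length
  (List.range (length - 1)).foldl (pvABody cs) true

-- ===== PORT B =====
-- _runs of Source B: the outer while loop walks the string run by run (here: recursion on the
-- remaining suffix); the inner counting loop is the length of the equal prefix (takeWhile).
def pvRuns : List Char → List (Char × Nat)
  | [] => []
  | c :: cs =>
      (c, 1 + (cs.takeWhile (fun x => x = c)).length) :: pvRuns (cs.dropWhile (fun x => x = c))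
termination_by l => l.length
decreasing_by
  simp only [List.length_cons]
  exact Nat.lt_succ_of_le (List.length_dropWhile_le _ _)

def check_same_letter_alt (word : String) : Bool :=
  (pvRuns word.toList).all (fun p => p.1 = 'e' || p.1 = 'o' || p.2 = 1)

-- ===== PRECONDITION & SPEC =====
def Spec_check_same_letter (word : String) (out : Bool) : Prop := out = check_same_letter_alt word
instance (word : String) (out : Bool) : Decidable (Spec_check_same_letter word out) := by unfold Spec_check_same_letter; infer_instance

-- ===== CLAIM (what is proved, stated in full; the proofs are below) =====
def Claim_equal_check_same_letter : Prop := ∀ (word : String), Dom_check_same_letter word → Spec_check_same_letter word (check_same_letter word)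

-- ===== LEMMAS AND PROOFS =====

-- proof-side recursive characterisation of "no disallowed adjacent duplicates"
def pvSpec : List Char → Bool
  | [] => true
  | [_] => true
  | a :: b :: r => ((a ≠ b) || a = 'e' || a = 'o') && pvSpec (b :: r)

theorem pvABody_shift (c : Char) (cs : List Char) (b : Bool) (i : Nat) :
    pvABody (c :: cs) b (i + 1) = pvABody cs b i := by
  simp [pvABody]

theorem pv_foldl_false (cs : List Char) (l : List Nat) :
    l.foldl (pvABody cs) false = false := by
  induction l with
  | nil => rfl
  | cons i l ih =>
      simp only [List.foldl_cons]
      have : pvABody cs false i = false := by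
        unfold pvABody; split_ifs <;> rfl
      rw [this, ih]

theorem pv_shift (c : Char) (cs : List Char) (b : Bool) (l : List Nat) :
    l.foldl (fun b i => pvABody (c :: cs) b (i + 1)) b = l.foldl (pvABody cs) b := by
  simp only [pvABody_shift]

theorem pv_a_spec (cs : List Char) :
    (List.range (cs.length - 1)).foldl (pvABody cs) true = pvSpec cs := by
  induction cs with
  | nil => rfl
  | cons c cs ih =>
      cases cs with
      | nil => rfl
      | cons d rest =>
        have hlen : (c :: d :: rest : List Char).length - 1 = (d :: rest : List Char).length - 1 + 1 := by
          simp
        rw [hlen, List.range_succ_eq_map, List.foldl_cons, List.foldl_map, pv_shift]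
        by_cases hcd : c = d
        · by_cases heo : c = 'e' ∨ c = 'o'
          · have hbody : pvABody (c :: d :: rest) true 0 = true := by
              unfold pvABody
              rcases heo with h | h <;> subst h <;> simp [← hcd]
            rw [hbody, ih]
            rcases heo with h | h <;> subst h <;> simp [pvSpec, ← hcd]
          · subst hcd
            push Not at heo
            have hbody : pvABody (c :: c :: rest) true 0 = false := by
              simp [pvABody, heo.1, heo.2]
            rw [hbody, pv_foldl_false]
            simp [pvSpec, heo.1, heo.2]
        · have hbody : pvABody (c :: d :: rest) true 0 = true := by
            simp [pvABody, hcd]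
          rw [hbody, ih]
          simp [pvSpec, hcd]

theorem pv_spec_rle (n : Nat) : ∀ cs : List Char, cs.length ≤ n →
    pvSpec cs = (pvRuns cs).all (fun p => p.1 = 'e' || p.1 = 'o' || p.2 = 1) := by
  induction n with
  | zero =>
      intro cs h
      have : cs = [] := List.eq_nil_of_length_eq_zero (Nat.le_zero.mp h)
      subst this; simp [pvSpec, pvRuns]
  | succ m ih =>
      intro cs h
      cases cs with
      | nil => simp [pvSpec, pvRuns]
      | cons c cs' =>
        cases cs' with
        | nil => simp [pvSpec, pvRuns]
        | cons d r =>
          by_cases hcd : d = c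
          · subst hcd
            have h1 : (d :: r : List Char).length ≤ m := by
              simp at h ⊢; omega
            have IH := ih (d :: r) h1
            rw [pvRuns] at IH ⊢
            simp only [List.takeWhile_cons, List.dropWhile_cons, decide_true, List.all_cons] at IH ⊢
            have h2 : ¬ (1 + ((r.takeWhile (fun x => decide (x = d))).length + 1) = 1) := by omega
            cases hE : (decide (d = 'e') || decide (d = 'o')) with
            | true =>
                simp only [hE, Bool.true_or, Bool.true_and] at IH ⊢
                simp [pvSpec, hE, IH]
            | false =>
                simp [pvSpec, hE]
          · have h1 : (d :: r : List Char).length ≤ m := by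
              simp at h ⊢; omega
            have IH := ih (d :: r) h1
            rw [pvRuns]
            have ht : (d :: r).takeWhile (fun x => decide (x = c)) = [] := by
              simp [hcd]
            have hd : (d :: r).dropWhile (fun x => decide (x = c)) = d :: r := by
              simp [hcd]
            rw [ht, hd]
            have hne : c ≠ d := fun h' => hcd h'.symm
            simp [pvSpec, List.all_cons, hne, IH]

-- ===== VERDICT (by name: the statement is the Claim_ definition above) =====
theorem check_same_letter_spec : Claim_equal_check_same_letter := by
  intro word _
  unfold Spec_check_same_letter check_same_letter check_same_letter_alt
  rw [pv_a_spec]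
  exact pv_spec_rle word.toList.length word.toList (Nat.le_refl _)
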